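-- pv_equiv track=rewrite | github.com/JohnDoe-collab-stack/forU2read | Empirical/aslmt/v18_algebra_multistep_64_strong_v3/audit_v18_algebra_multistep_64_strong_v3_algebra.py | _pair_index
-- ===== SOURCE A (Python) =====
-- def _pair_index(n: int) -> dict[tuple[int, int], int]:
--     """
--     Map unordered pairs (u,v) with u<v to a dense [0, C(n,2)) index.
--     """
--     n = int(n)
--     out: dict[tuple[int, int], int] = {}
--     k = 0
--     for u in range(n):
--         for v in range(u + 1, n):
--             out[(u, v)] = k
--             k += 1
--     return out
-- ===== SOURCE B (Python) =====
-- def _pair_index(n: int) -> dict[tuple[int, int], int]: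
--     """
--     Map unordered pairs (u,v) with u<v to a dense [0, C(n,2)) index.
--     """
--     n = int(n)
--     return {
--         (u, v): u * (n - 1) - u * (u - 1) // 2 + (v - u - 1)
--         for u in range(n)
--         for v in range(u + 1, n)
--     }
-- ===== Notes on version B (the rewrite author's own statement) =====
-- stated objective: alternative
-- what changed: Replaced the sequential running counter k with the closed-form triangular-number formula u*(n-1) - u*(u-1)//2 + (v-u-1), so every index is computed independently in a dict comprehension instead of threading an accumulator through nested loops.
import Mathlib
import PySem

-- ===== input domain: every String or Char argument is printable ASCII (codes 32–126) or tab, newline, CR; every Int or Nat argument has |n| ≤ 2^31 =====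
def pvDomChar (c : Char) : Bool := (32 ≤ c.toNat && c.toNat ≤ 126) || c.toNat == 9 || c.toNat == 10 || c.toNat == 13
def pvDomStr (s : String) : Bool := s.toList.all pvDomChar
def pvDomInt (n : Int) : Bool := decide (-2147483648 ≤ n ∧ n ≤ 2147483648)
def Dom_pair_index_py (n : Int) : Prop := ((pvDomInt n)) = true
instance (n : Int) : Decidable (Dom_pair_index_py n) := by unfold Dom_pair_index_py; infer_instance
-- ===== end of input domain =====

-- B replaces A's sequential pair counter with the closed-form triangular index
-- u*(n-1) - u*(u-1)//2 + (v-u-1), computed independently per pair (alternative decomposition).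


-- ===== PORT A =====
-- A builds a dict with always-fresh keys (u,v), u<v, so each insertion appends; the dict is the
-- association list in insertion order, and the running counter k is the second fold component.
def pair_index_py (n : Int) : List (Int × Int × Int) :=
  ((PySem.List.pyRange 0 n 1).foldl
      (fun (st : List (Int × Int × Int) × Int) u =>
        (PySem.List.pyRange (u + 1) n 1).foldl
          (fun st v => (st.1 ++ [(u, v, st.2)], st.2 + 1)) st)
      ([], 0)).1

-- ===== PORT B =====
def pair_index_py_alt (n : Int) : List (Int × Int × Int) :=
  (PySem.List.pyRange 0 n 1).flatMap (fun u =>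
    (PySem.List.pyRange (u + 1) n 1).map (fun v =>
      (u, v, u * (n - 1) - PySem.Int.floordiv (u * (u - 1)) 2 + (v - u - 1))))

-- ===== PRECONDITION & SPEC =====
def Spec_pair_index_py (n : Int) (out : List (Int × Int × Int)) : Prop := out = pair_index_py_alt n
instance (n : Int) (out : List (Int × Int × Int)) : Decidable (Spec_pair_index_py n out) := by unfold Spec_pair_index_py; infer_instance

-- ===== CLAIM (what is proved, stated in full; the proofs are below) =====
def Claim_equal_pair_index_py : Prop := ∀ (n : Int), Dom_pair_index_py n → Spec_pair_index_py n (pair_index_py n)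

-- ===== LEMMAS AND PROOFS =====

-- closed-form start index of row u
def pvRowStart (n u : Int) : Int := u * (n - 1) - PySem.Int.floordiv (u * (u - 1)) 2

lemma pvFloordiv_even (t : Int) : PySem.Int.floordiv (2 * t) 2 = t := by
  rw [PySem.Int.floordiv_eq_ediv_of_pos (by norm_num)]
  exact Int.mul_ediv_cancel_left t (by norm_num)

lemma pvRowStart_step (n u : Int) : pvRowStart n (u + 1) = pvRowStart n u + (n - u - 1) := by
  obtain ⟨t, ht⟩ : Even (u * (u - 1)) := by
    have h := Int.even_mul_succ_self (u - 1)
    simpa [mul_comm, sub_add_cancel] using h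
  have h1 : u * (u - 1) = 2 * t := by omega
  have h2 : (u + 1) * (u + 1 - 1) = 2 * (t + u) := by nlinarith
  simp only [pvRowStart, h1, h2, pvFloordiv_even]
  ring

-- inner fold: appending the row for u, indices counted up from k
lemma pvInner (u n : Int) : ∀ (m : Nat) (a : Int), (n - a).toNat = m →
    ∀ (acc : List (Int × Int × Int)) (k : Int),
    (PySem.List.pyRange a n 1).foldl
      (fun (st : List (Int × Int × Int) × Int) v => (st.1 ++ [(u, v, st.2)], st.2 + 1)) (acc, k)
    = (acc ++ (PySem.List.pyRange a n 1).map (fun v => (u, v, k + (v - a))),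
       k + ((n - a).toNat : Int)) := by
  intro m
  induction m with
  | zero =>
    intro a ha acc k
    rw [PySem.List.pyRange_one_eq_nil (by omega)]
    simp; omega
  | succ m ih =>
    intro a ha acc k
    have hlt : a < n := by omega
    rw [PySem.List.pyRange_one_cons hlt]
    simp only [List.foldl_cons, List.map_cons]
    rw [ih (a + 1) (by omega) (acc ++ [(u, a, k)]) (k + 1)]
    simp only [Prod.mk.injEq]
    refine ⟨?_, by omega⟩
    rw [List.append_assoc, List.singleton_append]
    congr 1
    congr 1
    · simp
    · apply List.map_congr_left
      intro v _
      simp only [Prod.mk.injEq, true_and]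
      ring

-- outer fold, starting row a with the closed-form counter value
lemma pvOuter (n : Int) : ∀ (m : Nat) (a : Int), 0 ≤ a → (n - a).toNat = m →
    ∀ (acc : List (Int × Int × Int)),
    (PySem.List.pyRange a n 1).foldl
      (fun (st : List (Int × Int × Int) × Int) u =>
        (PySem.List.pyRange (u + 1) n 1).foldl
          (fun st v => (st.1 ++ [(u, v, st.2)], st.2 + 1)) st)
      (acc, pvRowStart n a)
    = (acc ++ (PySem.List.pyRange a n 1).flatMap (fun u =>
        (PySem.List.pyRange (u + 1) n 1).map (fun v =>
          (u, v, u * (n - 1) - PySem.Int.floordiv (u * (u - 1)) 2 + (v - u - 1)))),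
       pvRowStart n (if n ≤ a then a else n)) := by
  intro m
  induction m with
  | zero =>
    intro a ha0 ha acc
    rw [PySem.List.pyRange_one_eq_nil (by omega)]
    simp [if_pos (show n ≤ a by omega)]
  | succ m ih =>
    intro a ha0 ha acc
    have hlt : a < n := by omega
    rw [PySem.List.pyRange_one_cons hlt]
    simp only [List.foldl_cons, List.flatMap_cons]
    rw [pvInner a n (n - (a + 1)).toNat (a + 1) rfl acc (pvRowStart n a)]
    have hk : pvRowStart n a + ((n - (a + 1)).toNat : Int) = pvRowStart n (a + 1) := by
      rw [pvRowStart_step]; omega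
    rw [hk, ih (a + 1) (by omega) (by omega)]
    simp only [Prod.mk.injEq]
    constructor
    · rw [List.append_assoc]
      congr 1
      congr 1
      apply List.map_congr_left
      intro v _
      simp only [pvRowStart, Prod.mk.injEq, true_and]
      ring
    · split_ifs <;> congr 1 <;> omega

-- ===== VERDICT (by name: the statement is the Claim_ definition above) =====
theorem pair_index_py_spec : Claim_equal_pair_index_py := by
  intro n _
  unfold Spec_pair_index_py pair_index_py pair_index_py_alt
  have h0 : pvRowStart n 0 = (0 : Int) := by
    simp [pvRowStart]
  have h := pvOuter n (n - 0).toNat 0 le_rfl rfl []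
  rw [h0] at h
  rw [h]
  simp
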